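-- pv_equiv track=rewrite | github.com/xinran1216/CompoundAnnotation | src/fp_runner/pipeline.py | decode_fp_indices
-- ===== SOURCE A (Python) =====
-- from typing import List, Optional, Dict, Tuple, Callable, Iterable, Iterator, Any
--
-- def decode_fp_indices(indices, length: int = 7293) -> List[int]:
--     fp = [0] * length
--     for x in indices:
--         try:
--             i = int(x)
--         except Exception:
--             continue
--         if 0 <= i < length:
--             fp[i] = 1
--     return fp
-- ===== SOURCE B (Python) =====
-- def decode_fp_indices(indices, length: int = 7293):
--     valid = []
--     for x in indices:
--         try:
--             i = int(x)
--         except Exception: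
--             continue
--         if 0 <= i < length:
--             valid.append(i)
--     out = []
--     prev = 0
--     for i in sorted(set(valid)):
--         out.extend([0] * (i - prev))
--         out.append(1)
--         prev = i + 1
--     out.extend([0] * (length - prev))
--     return out
-- ===== Notes on version B (the rewrite author's own statement) =====
-- stated objective: alternative
-- what changed: A scatters 1-bits into a preallocated zero vector while looping over the input; B collects the in-range indices, sorts the deduplicated set, and emits the vector sequentially as runs of zeros between consecutive 1-positions.
import Mathlib
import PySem

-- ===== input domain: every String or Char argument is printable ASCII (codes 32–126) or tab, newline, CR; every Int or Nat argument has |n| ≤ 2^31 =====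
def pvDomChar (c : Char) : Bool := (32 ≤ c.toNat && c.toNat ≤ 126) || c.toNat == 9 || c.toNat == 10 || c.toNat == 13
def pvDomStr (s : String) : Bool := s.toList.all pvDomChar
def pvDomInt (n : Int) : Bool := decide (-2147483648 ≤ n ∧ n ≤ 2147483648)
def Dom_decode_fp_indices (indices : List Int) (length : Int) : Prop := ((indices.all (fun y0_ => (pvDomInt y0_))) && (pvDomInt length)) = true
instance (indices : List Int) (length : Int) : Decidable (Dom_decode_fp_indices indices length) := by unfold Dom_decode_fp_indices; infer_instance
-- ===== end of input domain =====

-- B collects the in-range indices, sorts their deduplicated set, and emits the vector as runs of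
-- zeros between consecutive 1-positions, instead of A's bit-scatter into a preallocated zero vector
-- (alternative algorithm, same cost up to the sort).

-- ===== PORT A =====
-- fp = [0]*length; for x in indices: i = int(x) (always succeeds on Int); if 0 <= i < length: fp[i] = 1
def decode_fp_indices (indices : List Int) (length : Int) : List Int :=
  indices.foldl
    (fun fp x =>
      let i := x
      if 0 ≤ i ∧ i < length then PySem.List.pySetD fp i 1 else fp)
    (List.replicate length.toNat 0)

-- ===== PORT B =====
-- valid = list of in-range ints; then emit [0]*(i-prev) + [1] for each i in sorted(set(valid)), pad with zeros
def decode_fp_indices_alt (indices : List Int) (length : Int) : List Int :=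
  let valid : List Int :=
    indices.foldl
      (fun acc x =>
        let i := x
        if 0 ≤ i ∧ i < length then acc ++ [i] else acc)
      []
  let st :=
    (PySem.List.sorted (PySem.Set.ofList valid) (fun x => x) false).foldl
      (fun (st : List Int × Int) i =>
        (st.1 ++ List.replicate (i - st.2).toNat 0 ++ [1], i + 1))
      ([], 0)
  st.1 ++ List.replicate (length - st.2).toNat 0

-- ===== PRECONDITION & SPEC =====
def Spec_decode_fp_indices (indices : List Int) (length : Int) (out : List Int) : Prop := out = decode_fp_indices_alt indices length
instance (indices : List Int) (length : Int) (out : List Int) : Decidable (Spec_decode_fp_indices indices length out) := by unfold Spec_decode_fp_indices; infer_instance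

-- ===== CLAIM (what is proved, stated in full; the proofs are below) =====
def Claim_equal_decode_fp_indices : Prop := ∀ (indices : List Int) (length : Int), Dom_decode_fp_indices indices length → Spec_decode_fp_indices indices length (decode_fp_indices indices length)

-- ===== LEMMAS AND PROOFS =====

-- the bit vector determined by a list of valid indices (membership indicator over the whole range)
def pvFill (length : Int) (l : List Int) : List Int :=
  (PySem.List.pyRange 0 length 1).map (fun k => if k ∈ l then 1 else 0)

lemma pvFill_congr (length : Int) (l l' : List Int) (h : ∀ k, k ∈ l ↔ k ∈ l') :
    pvFill length l = pvFill length l' := by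
  unfold pvFill
  exact List.map_congr_left (fun k _ => by simp [h k])

lemma pvFill_nil_mem (length : Int) (l : List Int) (h : ∀ k, k ∉ l) :
    pvFill length l = List.replicate (length - 0).toNat 0 := by
  unfold pvFill
  rw [List.map_congr_left (fun k _ => by simp [h k] : ∀ k ∈ PySem.List.pyRange 0 length 1, (if k ∈ l then (1:Int) else 0) = 0)]
  rw [List.map_const', PySem.List.length_pyRange_one]

-- A-side: setting bit x (0 ≤ x < length) in the fill of l gives the fill of l ++ [x]
lemma pvFill_set (length : Int) (l : List Int) (x : Int) (hx0 : 0 ≤ x) (_ : x < length) :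
    PySem.List.pySetD (pvFill length l) x 1 = pvFill length (l ++ [x]) := by
  rw [PySem.List.pySetD_of_nonneg _ _ hx0]
  apply List.ext_getElem
  · simp [pvFill, PySem.List.length_pyRange_one]
  · intro k h1 h2
    rw [List.getElem_set]
    simp only [pvFill, List.getElem_map, PySem.List.getElem_pyRange_one, zero_add]
    by_cases hk : x.toNat = k
    · have hkx : (k : Int) = x := by omega
      simp [hk, hkx]
    · have hkx : (k : Int) ≠ x := by omega
      simp [hk, List.mem_append, hkx]

-- A's loop invariant: scattering bits over a fill appends the marked indices to the fill's list
lemma pvLoopA (length : Int) : ∀ (indices : List Int) (l : List Int),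
    indices.foldl
      (fun fp x => let i := x; if 0 ≤ i ∧ i < length then PySem.List.pySetD fp i 1 else fp)
      (pvFill length l)
    = pvFill length
        (indices.foldl
          (fun acc x => let i := x; if 0 ≤ i ∧ i < length then acc ++ [i] else acc) l) := by
  intro indices
  induction indices with
  | nil => intro l; simp
  | cons x xs ih =>
    intro l
    simp only [List.foldl_cons]
    by_cases h : 0 ≤ x ∧ x < length
    · rw [if_pos h, if_pos h, pvFill_set length l x h.1 h.2]
      exact ih _
    · rw [if_neg h, if_neg h]
      exact ih _

-- B's loop: over a strictly increasing list with all elements in [p, length), the run construction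
-- produces the membership fill of the suffix range
lemma pvLoopB (length : Int) : ∀ (L : List Int) (acc : List Int) (p : Int),
    L.Pairwise (· < ·) → (∀ i ∈ L, p ≤ i ∧ i < length) →
    (let st := L.foldl
        (fun (st : List Int × Int) i =>
          (st.1 ++ List.replicate (i - st.2).toNat 0 ++ [1], i + 1)) (acc, p)
     st.1 ++ List.replicate (length - st.2).toNat 0)
    = acc ++ (PySem.List.pyRange p length 1).map (fun k => if k ∈ L then 1 else 0) := by
  intro L
  induction L with
  | nil =>
    intro acc p _ _
    simp only [List.foldl_nil]
    rw [show (fun k => if k ∈ ([]:List Int) then (1:Int) else 0) = fun _ => (0:Int) from funext (fun k => by simp)]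
    rw [List.map_const', PySem.List.length_pyRange_one]
  | cons i rest ih =>
    intro acc p hpw hb
    have hi := hb i (by simp)
    have hrest : ∀ j ∈ rest, i + 1 ≤ j ∧ j < length := by
      intro j hj
      exact ⟨by have := (List.pairwise_cons.mp hpw).1 j hj; omega, (hb j (by simp [hj])).2⟩
    simp only [List.foldl_cons]
    rw [ih (acc ++ List.replicate (i - p).toNat 0 ++ [1]) (i + 1)
          (List.pairwise_cons.mp hpw).2 hrest]
    -- rewrite the indicator over the suffix range from `rest` to `i :: rest`
    have hsuffix : (PySem.List.pyRange (i+1) length 1).map (fun k => if k ∈ rest then (1:Int) else 0)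
        = (PySem.List.pyRange (i+1) length 1).map (fun k => if k ∈ i :: rest then (1:Int) else 0) := by
      apply List.map_congr_left
      intro k hk
      have hk' := (PySem.List.mem_pyRange_one).mp hk
      have : k ≠ i := by omega
      simp [List.mem_cons, this]
    rw [hsuffix]
    -- split the full range at i and i+1
    rw [PySem.List.pyRange_one_append p i length (by omega) (by omega),
        PySem.List.pyRange_one_append i (i+1) length (by omega) (by omega),
        PySem.List.pyRange_one_singleton]
    have hprefix : (PySem.List.pyRange p i 1).map (fun k => if k ∈ i :: rest then (1:Int) else 0)
        = List.replicate (i - p).toNat 0 := by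
      rw [List.map_congr_left (fun k hk => by
            have hk' := (PySem.List.mem_pyRange_one).mp hk
            have h1 : k ≠ i := by omega
            have h2 : k ∉ rest := fun hm => by have := (hrest k hm).1; omega
            simp [List.mem_cons, h1, h2] : ∀ k ∈ PySem.List.pyRange p i 1, (if k ∈ i :: rest then (1:Int) else 0) = 0)]
      rw [List.map_const', PySem.List.length_pyRange_one]
    rw [List.map_append, List.map_append, hprefix]
    simp

-- ===== VERDICT (by name: the statement is the Claim_ definition above) =====
theorem decode_fp_indices_spec : Claim_equal_decode_fp_indices := by
  intro indices length _
  unfold Spec_decode_fp_indices decode_fp_indices decode_fp_indices_alt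
  -- A's side: fold over the zero vector = fill of the collected valid list
  have hA : List.replicate length.toNat 0 = pvFill length ([] : List Int) := by
    rw [pvFill_nil_mem length [] (by simp)]; norm_num
  rw [hA, pvLoopA length indices []]
  -- B's side
  set valid := indices.foldl
      (fun acc x => let i := x; if 0 ≤ i ∧ i < length then acc ++ [i] else acc) ([] : List Int) with hvalid
  have hvmem : ∀ k, k ∈ valid → 0 ≤ k ∧ k < length := by
    rw [hvalid, PySem.List.foldl_append_ite (p := fun i => 0 ≤ i ∧ i < length) (f := fun i => i)]
    intro k hk
    simp only [List.nil_append, List.mem_map, List.mem_filter] at hk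
    obtain ⟨j, hj, rfl⟩ := hk
    exact of_decide_eq_true hj.2
  set L := PySem.List.sorted (PySem.Set.ofList valid) (fun x => x) false with hL
  have hperm : L.Perm (PySem.Set.ofList valid) := PySem.List.sorted_perm _ _ _
  have hpw : L.Pairwise (· < ·) := PySem.List.sorted_ofList_pairwise_lt valid
  have hbound : ∀ i ∈ L, 0 ≤ i ∧ i < length := by
    intro i hi
    exact hvmem i ((PySem.Set.mem_ofList _ _).mp (hperm.mem_iff.mp hi))
  have := pvLoopB length L ([] : List Int) 0 hpw hbound
  simp only [List.nil_append] at this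
  rw [this]
  apply pvFill_congr
  intro k
  rw [hperm.mem_iff, PySem.Set.mem_ofList]
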